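-- pv_equiv track=rewrite | github.com/julia-majkowska/Rzeczy-na-uczelnie | tm/Z2/mistrz_riposty.py | check_radius
-- ===== SOURCE A (Python) =====
-- def check_radius(radius, prefsum, all_occurances):
--     for i in range(1, len(prefsum), 1):
--         good = True
--         for ii in range(len(prefsum[i])):
--             koniec = i
--             while koniec< len(prefsum) and all_occurances[koniec]  <=  i + radius:
--                 koniec += 1
--             koniec-=1
--             if prefsum[koniec][ii] <= prefsum[i-1][ii] :
--                 good = False
--                 break
--         if good :
--             return i
--     return None
-- ===== SOURCE B (Python) =====
-- def check_radius(radius, prefsum, all_occurances):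
--     n = len(prefsum)
--     f = 1
--     for i in range(1, n):
--         if f < i:
--             f = i
--         while f < n and all_occurances[f] <= i + radius:
--             f += 1
--         koniec = f - 1
--         cur, prev = prefsum[koniec], prefsum[i - 1]
--         if all(cur[ii] > prev[ii] for ii in range(len(prefsum[i]))):
--             return i
--     return None
-- ===== Notes on version B (the rewrite author's own statement) =====
-- stated objective: faster
-- what changed: B hoists the koniec window scan out of the per-column loop and maintains the scan pointer f across outer iterations as a two-pointer (each occurrence index is passed at most once overall), replacing A's recomputation of koniec for every column of every i.
-- outside the precondition, e.g. on check_radius(0, [[], []], []): A returns 1, B raises IndexError; on check_radius(-2, [[1], [5, 7], [9]], [0, 0, 0]): A returns 2, B returns 2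
import Mathlib
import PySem

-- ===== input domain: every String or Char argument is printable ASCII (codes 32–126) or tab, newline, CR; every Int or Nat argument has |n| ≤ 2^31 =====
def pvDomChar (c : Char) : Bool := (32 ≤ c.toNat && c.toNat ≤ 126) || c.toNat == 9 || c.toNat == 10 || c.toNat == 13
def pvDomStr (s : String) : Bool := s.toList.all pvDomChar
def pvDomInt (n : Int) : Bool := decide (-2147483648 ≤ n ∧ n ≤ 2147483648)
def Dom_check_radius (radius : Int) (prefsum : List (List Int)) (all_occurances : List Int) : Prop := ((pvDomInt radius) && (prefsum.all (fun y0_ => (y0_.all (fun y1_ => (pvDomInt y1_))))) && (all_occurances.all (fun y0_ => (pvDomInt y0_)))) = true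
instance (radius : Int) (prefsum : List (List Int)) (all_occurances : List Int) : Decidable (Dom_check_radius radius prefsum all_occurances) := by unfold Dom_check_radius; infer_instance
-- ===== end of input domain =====

-- B hoists the `koniec` scan out of the per-column loop and carries the scan pointer across
-- outer iterations (two-pointer), so each occurrence index is scanned at most once overall (faster).

-- ===== PORT A =====
-- list indexing with getD defaults; exact under Pre_ (every index in range there)
def pvRowGet (prefsum : List (List Int)) (i : Int) : List Int := (PySem.List.pyGet? prefsum i).getD []
def pvIntGet (xs : List Int) (i : Int) : Int := (PySem.List.pyGet? xs i).getD 0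

-- the `while koniec < len(prefsum) and all_occurances[koniec] <= i + radius: koniec += 1` loop
-- (B's while loop in Source B is textually the same loop, so both ports use this helper)
def pvKoniec (occ : List Int) (n : Nat) (limit : Int) (k : Nat) : Nat :=
  if h : k < n ∧ pvIntGet occ (k : Int) ≤ limit then pvKoniec occ n limit (k + 1) else k
termination_by n - k
decreasing_by omega

-- A's inner `for ii in range(len(prefsum[i]))` loop; recomputes koniec each iteration like A
def pvAInner (radius : Int) (prefsum : List (List Int)) (occ : List Int) (i leni ii : Nat) : Bool :=
  if ii < leni then
    if pvIntGet (pvRowGet prefsum ((pvKoniec occ prefsum.length ((i : Int) + radius) i - 1 : Nat) : Int)) (ii : Int) ≤ pvIntGet (pvRowGet prefsum ((i : Int) - 1)) (ii : Int) then false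
    else pvAInner radius prefsum occ i leni (ii + 1)
  else true
termination_by leni - ii
decreasing_by omega

-- A's outer `for i in range(1, len(prefsum))` loop
def pvAOuter (radius : Int) (prefsum : List (List Int)) (occ : List Int) (i : Nat) : Option Int :=
  if h : i < prefsum.length then
    if pvAInner radius prefsum occ i (pvRowGet prefsum (i : Int)).length 0 then some (i : Int)
    else pvAOuter radius prefsum occ (i + 1)
  else none
termination_by prefsum.length - i
decreasing_by omega

def check_radius (radius : Int) (prefsum : List (List Int)) (all_occurances : List Int) : Option Int :=
  pvAOuter radius prefsum all_occurances 1

-- ===== PORT B =====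
-- `all(cur[ii] > prev[ii] for ii in range(len(prefsum[i])))`
def pvBAll (cur prev : List Int) (leni ii : Nat) : Bool :=
  if ii < leni then
    if pvIntGet prev (ii : Int) < pvIntGet cur (ii : Int) then pvBAll cur prev leni (ii + 1)
    else false
  else true
termination_by leni - ii
decreasing_by omega

-- B's outer loop, carrying the scan pointer f
def pvBOuter (radius : Int) (prefsum : List (List Int)) (occ : List Int) (f i : Nat) : Option Int :=
  if h : i < prefsum.length then
    let f0 := max f i      -- `if f < i: f = i`
    let f1 := pvKoniec occ prefsum.length ((i : Int) + radius) f0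
    let koniec := f1 - 1
    if pvBAll (pvRowGet prefsum (koniec : Int)) (pvRowGet prefsum ((i : Int) - 1)) (pvRowGet prefsum (i : Int)).length 0
    then some (i : Int)
    else pvBOuter radius prefsum occ f1 (i + 1)
  else none
termination_by prefsum.length - i
decreasing_by omega

def check_radius_alt (radius : Int) (prefsum : List (List Int)) (all_occurances : List Int) : Option Int :=
  pvBOuter radius prefsum all_occurances 1 1

-- ===== PRECONDITION & SPEC =====
-- Pre_ excludes inputs on which A raises IndexError (all_occurances shorter than prefsum, or
-- a row indexed beyond its length); being closed-form it also excludes some ragged/short inputs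
-- on which A happens to return after an early break — see the cited examples.
def Pre_check_radius (radius : Int) (prefsum : List (List Int)) (all_occurances : List Int) : Prop :=
  prefsum.length ≤ 1 ∨
    (prefsum.length ≤ all_occurances.length ∧
      ∀ r ∈ prefsum.tail, ∀ r' ∈ prefsum, r.length ≤ r'.length)
instance (radius : Int) (prefsum : List (List Int)) (all_occurances : List Int) : Decidable (Pre_check_radius radius prefsum all_occurances) := by unfold Pre_check_radius; infer_instance

def pvWitness_check_radius : Int × List (List Int) × List Int := (0, [[0], [1]], [0, 0])

def Spec_check_radius (radius : Int) (prefsum : List (List Int)) (all_occurances : List Int) (out : Option Int) : Prop := out = check_radius_alt radius prefsum all_occurances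
instance (radius : Int) (prefsum : List (List Int)) (all_occurances : List Int) (out : Option Int) : Decidable (Spec_check_radius radius prefsum all_occurances out) := by unfold Spec_check_radius; infer_instance

-- ===== CLAIM (what is proved, stated in full; the proofs are below) =====
def Claim_equal_check_radius : Prop := ∀ (radius : Int) (prefsum : List (List Int)) (all_occurances : List Int), Dom_check_radius radius prefsum all_occurances → Pre_check_radius radius prefsum all_occurances → Spec_check_radius radius prefsum all_occurances (check_radius radius prefsum all_occurances)

-- ===== LEMMAS AND PROOFS =====

theorem pvKoniec_le (occ : List Int) (n : Nat) (t : Int) (k : Nat) (hk : k ≤ n) :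
    pvKoniec occ n t k ≤ n := by
  fun_induction pvKoniec <;> simp_all

theorem pvKoniec_pass (occ : List Int) (n : Nat) (t : Int) (k : Nat) :
    ∀ j, k ≤ j → j < pvKoniec occ n t k → j < n ∧ pvIntGet occ (j : Int) ≤ t := by
  fun_induction pvKoniec with
  | case1 k h ih =>
    intro j hj1 hj2
    rcases Nat.lt_or_ge j (k + 1) with hj | hj
    · have : j = k := by omega
      subst this; exact h
    · exact ih j hj hj2
  | case2 k h => intro j hj1 hj2; omega

theorem pvKoniec_skip (occ : List Int) (n : Nat) (t : Int) :
    ∀ d k, (∀ j, k ≤ j → j < k + d → j < n ∧ pvIntGet occ (j : Int) ≤ t) →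
    pvKoniec occ n t k = pvKoniec occ n t (k + d) := by
  intro d
  induction d with
  | zero => intro k _; rfl
  | succ d ih =>
    intro k hpass
    have hk : k < n ∧ pvIntGet occ (k : Int) ≤ t := hpass k (Nat.le_refl k) (by omega)
    rw [pvKoniec, dif_pos hk]
    have := ih (k + 1) (fun j hj1 hj2 => hpass j (by omega) (by omega))
    rw [this]
    congr 1
    omega

-- A's inner loop equals B's all(...) once koniec is hoisted (A recomputes the same koniec each step)
theorem inner_eq (radius : Int) (prefsum : List (List Int)) (occ : List Int) (i : Nat) :
    ∀ leni ii, pvAInner radius prefsum occ i leni ii =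
      pvBAll (pvRowGet prefsum ((pvKoniec occ prefsum.length ((i : Int) + radius) i - 1 : Nat) : Int))
             (pvRowGet prefsum ((i : Int) - 1)) leni ii := by
  intro leni ii
  fun_induction pvAInner with
  | case1 ii h hle =>
    rw [pvBAll, if_pos h, if_neg (by omega)]
  | case2 ii h hle ih =>
    rw [pvBAll, if_pos h, if_pos (by omega)]
    exact ih
  | case3 ii h =>
    rw [pvBAll, if_neg h]

-- main invariant: entering outer iteration i with pointer f, everything in [i, f) already
-- passed an earlier (smaller) threshold, so rescanning from max f i gives A's koniec
theorem outer_eq (radius : Int) (prefsum : List (List Int)) (occ : List Int) :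
    ∀ m i f, prefsum.length - i ≤ m → 1 ≤ i → f ≤ prefsum.length →
    (∀ j, i ≤ j → j < f → j < prefsum.length ∧ pvIntGet occ (j : Int) ≤ (i : Int) - 1 + radius) →
    pvAOuter radius prefsum occ i = pvBOuter radius prefsum occ f i := by
  intro m
  induction m with
  | zero =>
    intro i f hm h1 hf hpass
    rw [pvAOuter, pvBOuter, dif_neg (by omega), dif_neg (by omega)]
  | succ m ih =>
    intro i f hm h1 hf hpass
    by_cases hi : i < prefsum.length
    · have hskip : pvKoniec occ prefsum.length ((i : Int) + radius) i =
          pvKoniec occ prefsum.length ((i : Int) + radius) (max f i) := by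
        have := pvKoniec_skip occ prefsum.length ((i : Int) + radius) (max f i - i) i
        rw [this]
        · congr 1; omega
        · intro j hj1 hj2
          have hj3 : j < f := by omega
          have := hpass j hj1 hj3
          exact ⟨this.1, by omega⟩
      rw [pvAOuter, pvBOuter, dif_pos hi, dif_pos hi]
      simp only
      rw [inner_eq, hskip]
      set f1 := pvKoniec occ prefsum.length ((i : Int) + radius) (max f i) with hf1
      by_cases hall : pvBAll (pvRowGet prefsum ((f1 - 1 : Nat) : Int)) (pvRowGet prefsum ((i : Int) - 1)) (pvRowGet prefsum (i : Int)).length 0 = true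
      · rw [if_pos hall, if_pos hall]
      · rw [if_neg hall, if_neg hall]
        apply ih (i + 1) f1 (by omega) (by omega)
        · exact pvKoniec_le occ prefsum.length _ _ (by omega)
        · intro j hj1 hj2
          by_cases hjf : j < max f i
          · have hjlt : j < f := by omega
            have := hpass j (by omega) hjlt
            refine ⟨this.1, by push_cast; omega⟩
          · have := pvKoniec_pass occ prefsum.length ((i : Int) + radius) (max f i) j (by omega) hj2
            refine ⟨this.1, by push_cast; omega⟩
    · rw [pvAOuter, pvBOuter, dif_neg hi, dif_neg hi]

-- ===== VERDICT (by name: the statement is the Claim_ definition above) =====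
theorem check_radius_spec : Claim_equal_check_radius := by
  intro radius prefsum all_occurances _hdom _hpre
  unfold Spec_check_radius check_radius check_radius_alt
  rcases Nat.eq_zero_or_pos prefsum.length with h0 | h0
  · rw [pvAOuter, pvBOuter, dif_neg (by omega), dif_neg (by omega)]
  · exact outer_eq radius prefsum all_occurances prefsum.length 1 1 (by omega) (by omega)
      (by omega) (by intro j h1 h2; omega)
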